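-- pv_equiv track=rewrite | github.com/cruzanstx/daplug | skills/cli-detector/scripts/router.py | _match_model_hint
-- ===== SOURCE A (Python) =====
-- from typing import Any, Optional
--
-- def _is_embedding_model(name: str) -> bool:
--     """Check if model name suggests it's an embedding model (not for chat/instruct)."""
--     lower = name.lower()
--     # Common embedding model indicators
--     embedding_keywords = ["embed", "embedding", "arctic-embed", "nomic-embed", "bge-", "e5-"]
--     # Other non-instruct model types
--     other_keywords = ["whisper", "tts", "speech", "vision-only", "rerank"]
--     for kw in embedding_keywords + other_keywords:
--         if kw in lower:
--             return True
--     return False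
--
-- def _pick_best_default_model(models: list[str]) -> Optional[str]:
--     """Pick the best default model, preferring instruct/chat models over embeddings."""
--     if not models:
--         return None
--
--     # Filter out embedding and other non-chat models
--     chat_models = [m for m in models if not _is_embedding_model(m)]
--
--     if chat_models:
--         # Prefer larger models first, then instruct/chat/coder variants
--         for keyword in ["120b", "80b", "70b", "32b", "30b", "20b", "8b", "coder", "instruct", "chat"]:
--             for m in chat_models:
--                 if keyword in m.lower():
--                     return m
--         return chat_models[0]
--
--     # Fallback to first model if all are embeddings
--     return models[0]
--
-- def _match_model_hint(hint: Optional[str], models: list[str]) -> Optional[str]: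
--     if not models:
--         return None
--     if not hint:
--         return _pick_best_default_model(models)
--     target = hint.strip().lower()
--     for m in models:
--         if target in str(m).lower():
--             return str(m)
--     return _pick_best_default_model(models)
-- ===== SOURCE B (Python) =====
-- from typing import Optional
--
-- _NONCHAT_KEYWORDS = ["embed", "embedding", "arctic-embed", "nomic-embed", "bge-", "e5-",
--                      "whisper", "tts", "speech", "vision-only", "rerank"]
-- _PREFERRED_KEYWORDS = ["120b", "80b", "70b", "32b", "30b", "20b", "8b", "coder", "instruct", "chat"]
--
--
-- def _is_nonchat(m: str) -> bool:
--     lower = m.lower()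
--     return any(kw in lower for kw in _NONCHAT_KEYWORDS)
--
--
-- def _priority(m: str) -> int:
--     """Index of the first preferred keyword occurring in m (len = no keyword)."""
--     lower = m.lower()
--     return next((i for i, kw in enumerate(_PREFERRED_KEYWORDS) if kw in lower),
--                 len(_PREFERRED_KEYWORDS))
--
--
-- def _match_model_hint(hint: Optional[str], models: list[str]) -> Optional[str]:
--     if not models:
--         return None
--     hit = None
--     if hint:
--         target = hint.strip().lower()
--         hit = next((m for m in models if target in m.lower()), None)
--     if hit is not None:
--         return hit
--     chat = [m for m in models if not _is_nonchat(m)]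
--     if not chat:
--         return models[0]
--     # score-then-argmin: smallest (priority, original position) wins
--     return min(enumerate(chat), key=lambda p: (_priority(p[1]), p[0]))[1]
-- ===== Notes on version B (the rewrite author's own statement) =====
-- stated objective: alternative
-- what changed: The priority-ordered nested early-return scan over keywords x models in _pick_best_default_model is replaced by computing a numeric priority per model (index of its first matching preferred keyword, sentinel if none) and taking the argmin of (priority, original position) in one min() pass; the hint scan becomes a next() over a generator.
import Mathlib
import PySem

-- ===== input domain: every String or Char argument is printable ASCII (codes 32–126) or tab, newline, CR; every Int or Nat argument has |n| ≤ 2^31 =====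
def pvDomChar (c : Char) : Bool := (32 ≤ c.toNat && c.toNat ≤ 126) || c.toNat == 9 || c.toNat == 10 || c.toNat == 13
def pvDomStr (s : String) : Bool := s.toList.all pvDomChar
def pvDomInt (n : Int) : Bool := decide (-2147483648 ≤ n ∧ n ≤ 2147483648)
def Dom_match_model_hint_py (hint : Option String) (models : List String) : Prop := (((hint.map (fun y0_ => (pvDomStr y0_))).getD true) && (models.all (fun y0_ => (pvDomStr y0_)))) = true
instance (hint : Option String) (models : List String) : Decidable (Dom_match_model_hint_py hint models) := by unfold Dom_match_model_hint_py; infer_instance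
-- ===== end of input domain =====

-- B replaces A's priority-ordered nested early-return scan by a score-then-argmin
-- selection (per-model numeric priority, then min over (priority, position)); objective: alternative.


-- ===== PORT A =====
def embeddingKeywords : List String := ["embed", "embedding", "arctic-embed", "nomic-embed", "bge-", "e5-"]
def otherKeywords : List String := ["whisper", "tts", "speech", "vision-only", "rerank"]

def isEmbeddingModel (name : String) : Bool :=
  let lower := PySem.Str.lower name
  (embeddingKeywords ++ otherKeywords).any (fun kw => PySem.Str.isIn kw lower)

def prefKeywords : List String := ["120b", "80b", "70b", "32b", "30b", "20b", "8b", "coder", "instruct", "chat"]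

-- the nested 'for keyword: for m: return m' loop of _pick_best_default_model
def findPref : List String → List String → Option String
  | [], _ => none
  | kw :: kws, chat =>
    match chat.find? (fun m => PySem.Str.isIn kw (PySem.Str.lower m)) with
    | some m => some m
    | none => findPref kws chat

def pickBestDefaultModel (models : List String) : Option String :=
  if models = [] then none
  else
    let chat := models.filter (fun m => !isEmbeddingModel m)
    if chat ≠ [] then
      match findPref prefKeywords chat with
      | some m => some m
      | none => chat.head?
    else models.head?

def match_model_hint_py (hint : Option String) (models : List String) : Option String :=
  if models = [] then none
  else
    match hint with
    | none => pickBestDefaultModel models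
    | some h =>
      if h = "" then pickBestDefaultModel models
      else
        let target := PySem.Str.lower (PySem.Str.strip h)
        match models.find? (fun m => PySem.Str.isIn target (PySem.Str.lower m)) with
        | some m => some m
        | none => pickBestDefaultModel models

-- ===== PORT B =====
def nonchatKeywordsB : List String := ["embed", "embedding", "arctic-embed", "nomic-embed", "bge-", "e5-", "whisper", "tts", "speech", "vision-only", "rerank"]
def prefKeywordsB : List String := ["120b", "80b", "70b", "32b", "30b", "20b", "8b", "coder", "instruct", "chat"]

def isNonchatB (m : String) : Bool :=
  let lower := PySem.Str.lower m
  nonchatKeywordsB.any (fun kw => PySem.Str.isIn kw lower)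

-- next((i for i, kw in enumerate(_PREFERRED_KEYWORDS) if kw in lower), len(_PREFERRED_KEYWORDS))
def priorityB (m : String) : Int :=
  let lower := PySem.Str.lower m
  (((PySem.List.enumerate prefKeywordsB 0).find? (fun p => PySem.Str.isIn p.2 lower)).map (·.1)).getD (PySem.List.len prefKeywordsB)

def match_model_hint_py_alt (hint : Option String) (models : List String) : Option String :=
  if models = [] then none
  else
    let hit : Option String :=
      match hint with
      | none => none
      | some h =>
        if h = "" then none
        else
          let target := PySem.Str.lower (PySem.Str.strip h)
          models.find? (fun m => PySem.Str.isIn target (PySem.Str.lower m))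
    match hit with
    | some m => some m
    | none =>
      let chat := models.filter (fun m => !isNonchatB m)
      if chat = [] then models.head?
      else (PySem.List.min2? (PySem.List.enumerate chat 0) (fun p => priorityB p.2) (fun p => p.1)).map (·.2)

-- ===== PRECONDITION & SPEC =====
def Spec_match_model_hint_py (hint : Option String) (models : List String) (out : Option String) : Prop := out = match_model_hint_py_alt hint models
instance (hint : Option String) (models : List String) (out : Option String) : Decidable (Spec_match_model_hint_py hint models out) := by unfold Spec_match_model_hint_py; infer_instance

-- ===== CLAIM (what is proved, stated in full; the proofs are below) =====
def Claim_equal_match_model_hint_py : Prop := ∀ (hint : Option String) (models : List String), Dom_match_model_hint_py hint models → Spec_match_model_hint_py hint models (match_model_hint_py hint models)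

-- ===== LEMMAS AND PROOFS =====

-- keep m unless the candidate is strictly better under f
def combineF (f : String → Int) (m : String) : Option String → String
  | none => m
  | some q => if f q < f m then q else m

-- first argmin of f over a list (keep the earlier element on ties)
def famin (f : String → Int) : List String → Option String
  | [] => none
  | c :: rest => some (combineF f c (famin f rest))

-- the fold step of PySem.List.min2? at keys (fun p => f p.2, fun p => p.1)
def stepF (f : String → Int) (acc : Option (Int × String)) (x : Int × String) : Option (Int × String) :=
  match acc with
  | none => some x
  | some m =>
    if (decide (f x.2 < f m.2) || !decide (f m.2 < f x.2) && decide (x.1 < m.1)) = true then some x else some m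

theorem combineF_none (f : String → Int) (m : String) : combineF f m none = m := rfl
theorem combineF_some (f : String → Int) (m q : String) :
    combineF f m (some q) = if f q < f m then q else m := rfl
theorem famin_cons (f : String → Int) (c : String) (rest : List String) :
    famin f (c :: rest) = some (combineF f c (famin f rest)) := rfl

theorem famin_mem {f : String → Int} : ∀ {l : List String} {q : String}, famin f l = some q → q ∈ l := by
  intro l
  induction l with
  | nil => intro q h; simp [famin] at h
  | cons c rest ih =>
    intro q h
    rw [famin_cons] at h
    cases hr : famin f rest with
    | none => rw [hr, combineF_none] at h; injection h with h; simp [h]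
    | some r =>
      rw [hr, combineF_some] at h
      by_cases hlt : f r < f c
      · rw [if_pos hlt] at h; injection h with h
        exact List.mem_cons_of_mem _ (h ▸ ih hr)
      · rw [if_neg hlt] at h; injection h with h; simp [h]

theorem famin_rel {f g : String → Int} {l : List String}
    (h : ∀ a ∈ l, ∀ b ∈ l, (f a < f b ↔ g a < g b)) : famin f l = famin g l := by
  induction l with
  | nil => rfl
  | cons c rest ih =>
    have hrest : famin f rest = famin g rest :=
      ih (fun a ha b hb => h a (List.mem_cons_of_mem _ ha) b (List.mem_cons_of_mem _ hb))
    rw [famin_cons, famin_cons, hrest]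
    cases hr : famin g rest with
    | none => rfl
    | some q =>
      have hq : q ∈ rest := famin_mem hr
      simp only [combineF_some, propext (h q (List.mem_cons_of_mem _ hq) c List.mem_cons_self)]

theorem famin_head {f : String → Int} {l : List String}
    (h : ∀ a ∈ l, ∀ b ∈ l, ¬ f a < f b) : famin f l = l.head? := by
  induction l with
  | nil => rfl
  | cons c rest ih =>
    rw [famin_cons]
    cases hr : famin f rest with
    | none => rfl
    | some q =>
      have hq : q ∈ rest := famin_mem hr
      rw [combineF_some, if_neg (h q (List.mem_cons_of_mem _ hq) c List.mem_cons_self)]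
      rfl

-- if p picks m first and p-elements have f = 0 while others have 0 < f, m is the first argmin
theorem famin_of_find? {f : String → Int} {p : String → Bool} {l : List String} {m : String}
    (hfind : l.find? p = some m)
    (h0 : ∀ x ∈ l, p x = true → f x = 0) (hpos : ∀ x ∈ l, p x = false → 0 < f x) :
    famin f l = some m := by
  induction l with
  | nil => simp at hfind
  | cons c rest ih =>
    by_cases hc : p c = true
    · rw [List.find?_cons_of_pos hc] at hfind
      obtain rfl : c = m := by injection hfind
      have hfc : f c = 0 := h0 c List.mem_cons_self hc
      rw [famin_cons]
      cases hr : famin f rest with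
      | none => rfl
      | some q =>
        have hq : q ∈ rest := famin_mem hr
        have hnlt : ¬ f q < f c := by
          rcases hp : p q with _ | _
          · have := hpos q (List.mem_cons_of_mem _ hq) hp; omega
          · have := h0 q (List.mem_cons_of_mem _ hq) hp; omega
        rw [combineF_some, if_neg hnlt]
    · have hc' : p c = false := by simpa using hc
      rw [List.find?_cons_of_neg (by simp [hc'])] at hfind
      have hrec : famin f rest = some m :=
        ih hfind (fun x hx => h0 x (List.mem_cons_of_mem _ hx))
          (fun x hx => hpos x (List.mem_cons_of_mem _ hx))
      have hpm : p m = true := List.find?_some hfind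
      have hfm : f m = 0 := h0 m (List.mem_cons_of_mem _ (famin_mem hrec)) hpm
      have hfc : 0 < f c := hpos c List.mem_cons_self hc'
      rw [famin_cons, hrec, combineF_some, if_pos (by omega)]

theorem comb_lt {f : String → Int} {c m : String} (o : Option String) (h : f c < f m) :
    combineF f c o = combineF f m (some (combineF f c o)) := by
  cases o <;> simp only [combineF_none, combineF_some] <;>
    split_ifs <;> first | rfl | omega

theorem comb_ge {f : String → Int} {c m : String} (o : Option String) (h : ¬ f c < f m) :
    combineF f m o = combineF f m (some (combineF f c o)) := by
  cases o <;> simp only [combineF_none, combineF_some] <;>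
    split_ifs <;> first | rfl | omega

theorem foldgen (f : String → Int) (l : List String) :
    ∀ (s i : Int) (m : String), i < s →
    ∃ j, List.foldl (stepF f) (some (i, m)) (PySem.List.enumerate l s)
      = some (j, combineF f m (famin f l)) := by
  induction l with
  | nil => intro s i m _; exact ⟨i, rfl⟩
  | cons c rest ih =>
    intro s i m his
    rw [PySem.List.enumerate_cons]
    simp only [List.foldl_cons]
    by_cases hlt : f c < f m
    · have hstep : stepF f (some (i, m)) (s, c) = some (s, c) := by
        simp [stepF, hlt]
      rw [hstep]
      obtain ⟨j, hj⟩ := ih (s + 1) s c (by omega)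
      exact ⟨j, by rw [hj, famin_cons, ← comb_lt _ hlt]⟩
    · have hstep : stepF f (some (i, m)) (s, c) = some (i, m) := by
        simp only [stepF]
        rw [if_neg (by simp [hlt]; intro; omega)]
      rw [hstep]
      obtain ⟨j, hj⟩ := ih (s + 1) i m (by omega)
      exact ⟨j, by rw [hj, famin_cons, ← comb_ge _ hlt]⟩

theorem min2_famin (f : String → Int) (chat : List String) :
    (PySem.List.min2? (PySem.List.enumerate chat 0) (fun p => f p.2) (fun p => p.1)).map (·.2)
      = famin f chat := by
  cases chat with
  | nil => rfl
  | cons c rest =>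
    have hdef : PySem.List.min2? (PySem.List.enumerate (c :: rest) 0) (fun p => f p.2) (fun p => p.1)
        = List.foldl (stepF f) none (PySem.List.enumerate (c :: rest) 0) := by
      unfold PySem.List.min2?
      congr 1
      funext acc x
      cases acc <;> simp [stepF]
    rw [hdef, PySem.List.enumerate_cons]
    simp only [List.foldl_cons]
    have hfirst : stepF f none ((0 : Int), c) = some (0, c) := rfl
    rw [hfirst]
    simp only [zero_add]
    obtain ⟨j, hj⟩ := foldgen f rest 1 0 c (by omega)
    rw [hj, famin_cons]
    rfl

-- priorityB computes the Int cast of List.findIdx over the keyword list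
theorem enum_find_idx (q : String → Bool) (ks : List String) :
    ∀ s : Int,
    ((((PySem.List.enumerate ks s).find? (fun p => q p.2)).map (·.1)).getD (s + ks.length))
      = s + (ks.findIdx q : Nat) := by
  induction ks with
  | nil => intro s; simp [PySem.List.enumerate_nil]
  | cons k ks ih =>
    intro s
    rw [PySem.List.enumerate_cons]
    by_cases hk : q k = true
    · rw [List.find?_cons_of_pos (by simpa using hk)]
      simp [List.findIdx_cons, hk]
    · have hk' : q k = false := by simpa using hk
      rw [List.find?_cons_of_neg (by simpa using hk)]
      simp only [List.findIdx_cons, hk', cond_false]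
      have hlen : s + (((k :: ks).length : Nat) : Int) = (s + 1) + ((ks.length : Nat) : Int) := by
        push_cast [List.length_cons]; ring
      rw [hlen, ih (s + 1)]
      push_cast
      ring

theorem priorityB_eq (m : String) :
    priorityB m = ((prefKeywordsB.findIdx (fun kw => PySem.Str.isIn kw (PySem.Str.lower m)) : Nat) : Int) := by
  have h := enum_find_idx (fun kw => PySem.Str.isIn kw (PySem.Str.lower m)) prefKeywordsB 0
  simp only [zero_add] at h
  simp only [priorityB, PySem.List.len_eq]
  exact h

-- A's nested keyword loop (with its chat_models[0] fallback) IS the first argmin of findIdx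
theorem findPref_famin : ∀ (ks chat : List String),
    (match findPref ks chat with | some m => some m | none => chat.head?)
      = famin (fun m => ((ks.findIdx (fun kw => PySem.Str.isIn kw (PySem.Str.lower m)) : Nat) : Int)) chat := by
  intro ks
  induction ks with
  | nil =>
    intro chat
    show chat.head? = _
    refine (famin_head ?_).symm
    intro a _ b _
    simp [List.findIdx_nil]
  | cons kw ks ih =>
    intro chat
    simp only [findPref]
    cases hfind : chat.find? (fun m => PySem.Str.isIn kw (PySem.Str.lower m)) with
    | some m =>
      show some m = _
      refine (famin_of_find? hfind ?_ ?_).symm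
      · intro x _ hx
        simp only [List.findIdx_cons, hx, cond_true, Nat.cast_zero]
      · intro x _ hx
        simp only [List.findIdx_cons, hx, cond_false]
        push_cast
        omega
    | none =>
      show (match findPref ks chat with | some m => some m | none => chat.head?) = _
      rw [ih chat]
      apply famin_rel
      intro a ha b hb
      have hna := List.find?_eq_none.mp hfind a ha
      have hnb := List.find?_eq_none.mp hfind b hb
      simp only [List.findIdx_cons]
      rw [show PySem.Str.isIn kw (PySem.Str.lower a) = false by simpa using hna,
          show PySem.Str.isIn kw (PySem.Str.lower b) = false by simpa using hnb]
      simp only [cond_false]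
      push_cast
      omega

theorem emb_eq_nonchat : isEmbeddingModel = isNonchatB := rfl

theorem pick_eq (models : List String) (hne : ¬ models = []) :
    pickBestDefaultModel models
      = (let chat := models.filter (fun m => !isNonchatB m)
         if chat = [] then models.head?
         else (PySem.List.min2? (PySem.List.enumerate chat 0) (fun p => priorityB p.2) (fun p => p.1)).map (·.2)) := by
  simp only [pickBestDefaultModel, if_neg hne, ← emb_eq_nonchat]
  by_cases hc : models.filter (fun m => !isEmbeddingModel m) = []
  · simp [hc]
  · simp only [if_neg hc, if_pos hc]
    rw [min2_famin]
    have hfn : priorityB = fun m => ((prefKeywordsB.findIdx (fun kw => PySem.Str.isIn kw (PySem.Str.lower m)) : Nat) : Int) :=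
      funext priorityB_eq
    rw [hfn]
    exact findPref_famin prefKeywords _

-- ===== VERDICT (by name: the statement is the Claim_ definition above) =====
theorem match_model_hint_py_spec : Claim_equal_match_model_hint_py := by
  intro hint models _
  unfold Spec_match_model_hint_py match_model_hint_py match_model_hint_py_alt
  by_cases hm : models = []
  · simp [hm]
  · simp only [if_neg hm]
    cases hint with
    | none => exact pick_eq models hm
    | some h =>
      by_cases hh : h = ""
      · simp only [if_pos hh]
        exact pick_eq models hm
      · simp only [if_neg hh]
        cases hfind : models.find? (fun m => PySem.Str.isIn (PySem.Str.lower (PySem.Str.strip h)) (PySem.Str.lower m)) with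
        | some m => rfl
        | none => exact pick_eq models hm
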